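-- pv_equiv track=rewrite | github.com/younsuyoung12/baccarat-ai-engine | features_china.py | _count_color_flips
-- ===== SOURCE A (Python) =====
-- from typing import Any, Dict, List, Optional, Tuple
--
-- def _count_color_flips(seq: List[str], window: int, allowed: Tuple[str, ...]) -> int:
--     if window < 0:
--         raise ValueError(f"window must be >= 0, got {window}")
--     for i, x in enumerate(seq):
--         if x not in allowed:
--             raise ValueError(f"seq[{i}] invalid: {x!r} (allowed: {allowed})")
--     tail = seq[-window:] if window > 0 else []
--     if len(tail) < 2:
--         return 0
--     flips = 0
--     for i in range(1, len(tail)):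
--         if tail[i] != tail[i - 1]:
--             flips += 1
--     return flips
-- ===== SOURCE B (Python) =====
-- def _count_color_flips(seq, window, allowed):
--     if window < 0:
--         raise ValueError(f"window must be >= 0, got {window}")
--     for i, x in enumerate(seq):
--         if x not in allowed:
--             raise ValueError(f"seq[{i}] invalid: {x!r} (allowed: {allowed})")
--     tail = seq[-window:] if window > 0 else []
--     return _flips_dc(tail)
--
-- def _flips_dc(xs):
--     # divide and conquer: flips(xs) = flips(left) + flips(right) + boundary flip
--     if len(xs) < 2:
--         return 0
--     mid = len(xs) // 2
--     left, right = xs[:mid], xs[mid:]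
--     return _flips_dc(left) + _flips_dc(right) + int(left[-1] != right[0])
-- ===== Notes on version B (the rewrite author's own statement) =====
-- stated objective: alternative
-- what changed: Replaces A's single linear index loop over neighbour pairs by a recursive divide-and-conquer: split the tail at the midpoint, count flips in each half recursively, and add one boundary flip if the halves' adjacent ends differ.
import Mathlib
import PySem

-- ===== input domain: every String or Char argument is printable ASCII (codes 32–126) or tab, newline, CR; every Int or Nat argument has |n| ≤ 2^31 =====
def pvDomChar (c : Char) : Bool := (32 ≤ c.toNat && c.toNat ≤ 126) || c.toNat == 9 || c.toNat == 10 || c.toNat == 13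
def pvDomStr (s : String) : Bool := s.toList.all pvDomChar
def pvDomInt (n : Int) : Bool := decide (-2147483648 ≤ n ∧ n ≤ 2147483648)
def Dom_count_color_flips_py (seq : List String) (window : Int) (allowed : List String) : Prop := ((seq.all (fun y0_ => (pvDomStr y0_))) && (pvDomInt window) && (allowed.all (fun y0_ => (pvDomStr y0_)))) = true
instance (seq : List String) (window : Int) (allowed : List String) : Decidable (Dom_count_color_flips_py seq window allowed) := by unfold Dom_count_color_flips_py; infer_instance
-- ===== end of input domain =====

-- B counts the flips in the tail by divide-and-conquer (split at the midpoint, recurse on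
-- both halves, add one if the boundary pair differs) instead of A's linear index loop;
-- same result, different algorithm, not faster.

-- ===== PORT A =====
def count_color_flips_py (seq : List String) (window : Int) (allowed : List String) : Int :=
  if window < 0 then 0  -- raise ValueError: excluded by Pre_
  else if seq.any (fun x => !(allowed.contains x)) then 0  -- raise ValueError: excluded by Pre_
  else
    let tail := if window > 0 then PySem.List.slice seq (some (-window)) none else []
    if tail.length < 2 then 0
    else
      (PySem.List.pyRange 1 (tail.length : Int) 1).foldl
        (fun flips i =>
          if PySem.List.pyGetD tail i "" ≠ PySem.List.pyGetD tail (i - 1) "" then flips + 1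
          else flips) 0

-- ===== PORT B =====
-- _flips_dc: divide and conquer on the list
def pvFlipsDC (xs : List String) : Int :=
  if _h : xs.length < 2 then 0
  else
    let mid : Nat := xs.length / 2
    let left := PySem.List.slice xs none (some (mid : Int))
    let right := PySem.List.slice xs (some (mid : Int)) none
    pvFlipsDC left + pvFlipsDC right +
      (if PySem.List.pyGetD left (-1) "" ≠ PySem.List.pyGetD right 0 "" then 1 else 0)
termination_by xs.length
decreasing_by
  · simp only [PySem.List.slice_to_natCast, List.length_take]
    omega
  · simp only [PySem.List.slice_from_natCast, List.length_drop]
    omega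

def count_color_flips_py_alt (seq : List String) (window : Int) (allowed : List String) : Int :=
  if window < 0 then 0  -- raise ValueError: excluded by Pre_
  else if seq.any (fun x => !(allowed.contains x)) then 0  -- raise ValueError: excluded by Pre_
  else
    let tail := if window > 0 then PySem.List.slice seq (some (-window)) none else []
    pvFlipsDC tail

-- ===== PRECONDITION & SPEC =====
-- Pre_ excludes exactly the inputs on which A raises ValueError: window < 0, or an element of seq not in allowed.
def Pre_count_color_flips_py (seq : List String) (window : Int) (allowed : List String) : Prop :=
  0 ≤ window ∧ ∀ x ∈ seq, x ∈ allowed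
instance (seq : List String) (window : Int) (allowed : List String) : Decidable (Pre_count_color_flips_py seq window allowed) := by unfold Pre_count_color_flips_py; infer_instance
def pvWitness_count_color_flips_py : List String × Int × List String := (["P", "B", "B", "P"], 3, ["P", "B", "T"])

def Spec_count_color_flips_py (seq : List String) (window : Int) (allowed : List String) (out : Int) : Prop := out = count_color_flips_py_alt seq window allowed
instance (seq : List String) (window : Int) (allowed : List String) (out : Int) : Decidable (Spec_count_color_flips_py seq window allowed out) := by unfold Spec_count_color_flips_py; infer_instance

-- ===== CLAIM (what is proved, stated in full; the proofs are below) =====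
def Claim_equal_count_color_flips_py : Prop := ∀ (seq : List String) (window : Int) (allowed : List String), Dom_count_color_flips_py seq window allowed → Pre_count_color_flips_py seq window allowed → Spec_count_color_flips_py seq window allowed (count_color_flips_py seq window allowed)

-- ===== LEMMAS AND PROOFS =====

-- number of adjacent differing pairs (proof-only characterisation both programs are reduced to)
def pvAdj : List String → Int
  | [] => 0
  | [_] => 0
  | a :: b :: l => (if b ≠ a then 1 else 0) + pvAdj (b :: l)

theorem pvAdj_single (a : String) : pvAdj [a] = 0 := rfl
theorem pvAdj_cons2 (a b : String) (l : List String) :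
    pvAdj (a :: b :: l) = (if b ≠ a then 1 else 0) + pvAdj (b :: l) := rfl

theorem pvAdj_short (xs : List String) (h : xs.length < 2) : pvAdj xs = 0 := by
  match xs, h with
  | [], _ => rfl
  | [_], _ => rfl

-- splitting the adjacent-pair count at a cut point
theorem pvAdj_append (l r : List String) (hl : l ≠ []) (hr : r ≠ []) :
    pvAdj (l ++ r) = pvAdj l + pvAdj r + (if r.headD "" ≠ l.getLastD "" then 1 else 0) := by
  induction l with
  | nil => exact absurd rfl hl
  | cons a l' ih =>
    cases l' with
    | nil =>
      cases r with
      | nil => exact absurd rfl hr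
      | cons b t =>
        simp only [List.cons_append, List.nil_append, pvAdj_cons2, pvAdj_single,
          List.headD_cons]
        have hga : ([a] : List String).getLastD "" = a := rfl
        rw [hga]
        split_ifs <;> ring
    | cons c l'' =>
      have h := ih (by simp)
      simp only [List.cons_append] at h ⊢
      rw [pvAdj_cons2, h, pvAdj_cons2]
      have hg : (c :: l'').getLastD "" = (a :: c :: l'').getLastD "" := by
        simp
      rw [hg]
      split_ifs <;> ring

-- for a nonempty list, getLastD is getLast
theorem pvGetLastD_eq (l : List String) (h : l ≠ []) : l.getLastD "" = l.getLast h := by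
  rw [List.getLastD_eq_getLast?, List.getLast?_eq_getLast_of_ne_nil h]
  rfl

-- the two ≠-guards of a boundary test count the same
theorem pvIteNeSymm (x y : String) : (if x ≠ y then (1 : Int) else 0) = if y ≠ x then 1 else 0 := by
  split_ifs with h1 h2 <;> simp_all [eq_comm]

-- B's divide and conquer computes the adjacent-pair count
theorem pvFlipsDC_eq : ∀ (n : Nat) (xs : List String), xs.length ≤ n → pvFlipsDC xs = pvAdj xs := by
  intro n
  induction n with
  | zero =>
    intro xs h
    have hx : xs = [] := List.eq_nil_of_length_eq_zero (by omega)
    subst hx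
    rw [pvFlipsDC]
    rfl
  | succ n ih =>
    intro xs h
    rw [pvFlipsDC]
    by_cases hs : xs.length < 2
    · rw [dif_pos hs, pvAdj_short xs hs]
    · rw [dif_neg hs]
      simp only [PySem.List.slice_to_natCast, PySem.List.slice_from_natCast]
      have hmid1 : 1 ≤ xs.length / 2 := by omega
      have hmid2 : xs.length / 2 < xs.length := by omega
      have hltake : (xs.take (xs.length / 2)).length = xs.length / 2 := by
        simp; omega
      have hldrop : (xs.drop (xs.length / 2)).length = xs.length - xs.length / 2 := by
        simp
      have hL : xs.take (xs.length / 2) ≠ [] := by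
        intro hc; rw [hc] at hltake; simp at hltake; omega
      have hR : xs.drop (xs.length / 2) ≠ [] := by
        intro hc; rw [hc] at hldrop; simp at hldrop; omega
      rw [ih _ (by omega), ih _ (by omega),
          PySem.List.pyGetD_neg_one _ "" hL, PySem.List.pyGetD_zero]
      have hcut : xs.take (xs.length / 2) ++ xs.drop (xs.length / 2) = xs := List.take_append_drop _ _
      have h1 : (xs.drop (xs.length / 2)).getD 0 "" = (xs.drop (xs.length / 2)).headD "" := by
        cases xs.drop (xs.length / 2) <;> simp [List.getD]
      have h2 : (xs.take (xs.length / 2)).getLast hL = (xs.take (xs.length / 2)).getLastD "" :=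
        (pvGetLastD_eq _ hL).symm
      rw [pvIteNeSymm, h1, h2, ← pvAdj_append _ _ hL hR, hcut]

-- A's index loop over range(1, len) computes acc + adjacent-pair count
theorem pvFlips_eq (l : List String) : ∀ (a : String) (acc : Int),
    (List.range l.length).foldl
        (fun (flips : Int) (k : Nat) =>
          if PySem.List.pyGetD (a :: l) (1 + (k : Int)) "" ≠ PySem.List.pyGetD (a :: l) ((1 + (k : Int)) - 1) "" then flips + 1
          else flips) acc
      = acc + pvAdj (a :: l) := by
  induction l with
  | nil => intro a acc; rw [pvAdj_single]; simp
  | cons b t ih =>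
    intro a acc
    have hlen : (b :: t).length = t.length + 1 := by simp
    rw [hlen, List.range_succ_eq_map, List.foldl_cons, List.foldl_map]
    have hget1 : PySem.List.pyGetD (a :: b :: t) (1 + ((0 : Nat) : Int)) "" = b := by
      have : (1 : Int) + ((0 : Nat) : Int) = ((1 : Nat) : Int) := by norm_num
      rw [this, PySem.List.pyGetD_natCast]; rfl
    have hget0 : PySem.List.pyGetD (a :: b :: t) ((1 + ((0 : Nat) : Int)) - 1) "" = a := by
      have : (1 + ((0 : Nat) : Int)) - 1 = ((0 : Nat) : Int) := by norm_num
      rw [this, PySem.List.pyGetD_natCast]; rfl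
    have hshift : ∀ (flips : Int) (k : Nat),
        (if PySem.List.pyGetD (a :: b :: t) (1 + ((Nat.succ k : Nat) : Int)) "" ≠ PySem.List.pyGetD (a :: b :: t) ((1 + ((Nat.succ k : Nat) : Int)) - 1) "" then flips + 1 else flips)
          = (if PySem.List.pyGetD (b :: t) (1 + ((k : Nat) : Int)) "" ≠ PySem.List.pyGetD (b :: t) ((1 + ((k : Nat) : Int)) - 1) "" then flips + 1 else flips) := by
      intro flips k
      have e1 : (1 : Int) + ((Nat.succ k : Nat) : Int) = (((k + 2 : Nat)) : Int) := by omega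
      have e2 : ((1 : Int) + ((Nat.succ k : Nat) : Int)) - 1 = (((k + 1 : Nat)) : Int) := by omega
      have e3 : (1 : Int) + ((k : Nat) : Int) = (((k + 1 : Nat)) : Int) := by omega
      have e4 : ((1 : Int) + ((k : Nat) : Int)) - 1 = ((k : Nat) : Int) := by omega
      rw [e2, e4, e1, e3, PySem.List.pyGetD_natCast, PySem.List.pyGetD_natCast,
          PySem.List.pyGetD_natCast, PySem.List.pyGetD_natCast]
      simp [List.getD]
    rw [hget1, hget0, List.foldl_ext _ _ _ (fun flips k _ => hshift flips k), ih, pvAdj_cons2]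
    by_cases h : b ≠ a
    · rw [if_pos h, if_pos h]
      ring
    · rw [if_neg h, if_neg h]
      ring

-- ===== VERDICT (by name: the statement is the Claim_ definition above) =====
theorem count_color_flips_py_spec : Claim_equal_count_color_flips_py := by
  intro seq window allowed _hdom hpre
  obtain ⟨hw, hall⟩ := hpre
  have hany : seq.any (fun x => !(allowed.contains x)) = false := by
    rw [List.any_eq_false]
    intro x hx
    simp [hall x hx]
  unfold Spec_count_color_flips_py count_color_flips_py count_color_flips_py_alt
  rw [if_neg (show ¬ window < 0 by omega), if_neg (show ¬ window < 0 by omega), hany]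
  simp only [Bool.false_eq_true, if_false]
  rw [pvFlipsDC_eq (if window > 0 then PySem.List.slice seq (some (-window)) none else []).length _ le_rfl]
  cases htail : (if window > 0 then PySem.List.slice seq (some (-window)) none else []) with
  | nil => simp [pvAdj]
  | cons t0 rest =>
    cases rest with
    | nil => simp [pvAdj_single]
    | cons b t =>
      rw [if_neg (show ¬ (t0 :: b :: t).length < 2 by simp)]
      have hr : PySem.List.pyRange 1 (((t0 :: b :: t).length : Nat) : Int) 1
          = (List.range (b :: t).length).map (fun (k : Nat) => 1 + (k : Int)) := by
        rw [PySem.List.pyRange_one]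
        have : ((((t0 :: b :: t).length : Nat) : Int) - 1).toNat = (b :: t).length := by
          simp
        rw [this]
      rw [hr, List.foldl_map, pvFlips_eq]
      omega
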